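-- pv_equiv track=rewrite | github.com/xiaoxin-yin/automath | atp/utils/lean_math_utils.py | generate_tactics_from_template
-- ===== SOURCE A (Python) =====
-- import itertools
--
-- def generate_tactics_from_template(template, type_of_item):
--     items_of_type = {'unknown': [], 'variable': [], 'hypothesis': []}
--     for item, type_ in type_of_item.items():
--         if type_ in items_of_type:
--             items_of_type[type_].append(item)
--     # Identify the placeholders and their types
--     parts = template.split('{')
--     fixed_parts = [parts[0]]
--     types = []
--
--     for part in parts[1:]:
--         typ, rest = part.split('}')
--         types.append(typ)
--         fixed_parts.append(rest)
--
--     # Generate all possible combinations of replacements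
--     replacement_lists = [items_of_type[typ] for typ in types]
--     combinations = itertools.product(*replacement_lists)
--
--     # Construct the sentences with all possible combinations
--     sentences = []
--     for combination in combinations:
--         sentence = fixed_parts[0]
--         for item, fixed_part in zip(combination, fixed_parts[1:]):
--             sentence += item + fixed_part
--         sentences.append(sentence)
--
--     return sentences
-- ===== SOURCE B (Python) =====
-- def generate_tactics_from_template(template, type_of_item):
--     # Parse placeholders exactly as the original (same exceptions on malformed templates)
--     parts = template.split('{')
--     fixed_parts = [parts[0]]
--     types = []
--     for part in parts[1:]:
--         typ, rest = part.split('}')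
--         types.append(typ)
--         fixed_parts.append(rest)
--     # Incremental fold: extend every partial sentence by each item of the placeholder's type
--     sentences = [fixed_parts[0]]
--     for typ, fixed in zip(types, fixed_parts[1:]):
--         items = [item for item, ty in type_of_item.items() if ty == typ]
--         sentences = [s + item + fixed for s in sentences for item in items]
--     return sentences
-- ===== Notes on version B (the rewrite author's own statement) =====
-- stated objective: simpler
-- what changed: B drops the three-bin dict and itertools.product: it filters the item list per placeholder type and grows the sentence list with an incremental fold (sentences = [s + item + fixed ...]), keeping the exact output order.
import Mathlib
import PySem

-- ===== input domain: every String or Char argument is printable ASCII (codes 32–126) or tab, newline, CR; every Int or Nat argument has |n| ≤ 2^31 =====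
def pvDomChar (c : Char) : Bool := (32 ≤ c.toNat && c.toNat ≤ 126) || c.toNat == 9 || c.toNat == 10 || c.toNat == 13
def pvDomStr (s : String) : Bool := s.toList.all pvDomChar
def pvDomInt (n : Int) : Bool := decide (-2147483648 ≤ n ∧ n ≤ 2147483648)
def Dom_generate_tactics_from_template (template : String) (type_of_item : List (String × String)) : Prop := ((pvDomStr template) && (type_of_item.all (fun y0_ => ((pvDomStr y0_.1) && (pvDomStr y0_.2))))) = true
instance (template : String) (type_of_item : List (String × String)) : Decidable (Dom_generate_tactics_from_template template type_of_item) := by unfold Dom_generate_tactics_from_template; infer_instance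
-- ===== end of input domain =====

-- B replaces A's dict binning + itertools.product by a per-placeholder filter and an
-- incremental fold over the placeholders (objective: simpler, same output order).
-- type_of_item is a Python dict, modelled as its item list (PySem.Dict.ofList semantics).

-- ===== PORT A =====
-- shared parsing helper: identical code in A and B ('typ, rest = part.split("}")' loop);
-- headD/getD defaults are reached only where the Python unpacking raises ValueError (outside Pre_)
def pvSplitBrace (part : List Char) : List Char × List Char :=
  let ts := PySem.Chars.splitOn part ['}']
  (ts.headD [], (ts.drop 1).headD [])

-- (fixed_parts[0], list of (typ, rest) for the remaining parts)
def pvParse (template : String) : List Char × List (List Char × List Char) :=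
  let parts := PySem.Chars.splitOn template.toList ['{']
  (parts.headD [], (parts.drop 1).map pvSplitBrace)

-- itertools.product over a list of lists (first list varies slowest)
def pvProduct : List (List (List Char)) → List (List (List Char))
  | [] => [[]]
  | l :: ls => l.flatMap (fun x => (pvProduct ls).map (fun c => x :: c))

def generate_tactics_from_template (template : String) (type_of_item : List (String × String)) : List String :=
  let items_of_type : PySem.Dict String (List (List Char)) :=
    (PySem.Dict.ofList type_of_item).items.foldl
      (fun d p => if d.contains p.2 then d.modify p.2 [] (fun l => l ++ [p.1.toList]) else d)
      (PySem.Dict.ofList [("unknown", []), ("variable", []), ("hypothesis", [])])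
  let parsed := pvParse template
  let types := parsed.2.map (·.1)
  let fixeds := parsed.2.map (·.2)
  let replacement_lists := types.map (fun t => items_of_type.getD (String.ofList t) [])
  let combos := pvProduct replacement_lists
  combos.map (fun c =>
    String.ofList ((c.zip fixeds).foldl (fun s q => s ++ q.1 ++ q.2) parsed.1))

-- ===== PORT B =====
def generate_tactics_from_template_alt (template : String) (type_of_item : List (String × String)) : List String :=
  let pairs := (PySem.Dict.ofList type_of_item).items
  let parsed := pvParse template
  (parsed.2.foldl
    (fun ss q =>
      let items := (pairs.filter (fun p => p.2 == String.ofList q.1)).map (fun p => p.1.toList)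
      ss.flatMap (fun s => items.map (fun it => s ++ it ++ q.2)))
    [parsed.1]).map String.ofList

-- ===== PRECONDITION & SPEC =====
-- Pre_ excludes exactly where A raises: a part after '{' without exactly one '}' (ValueError
-- on unpacking part.split('}')) or a placeholder type other than the three dict keys (KeyError).
def Pre_generate_tactics_from_template (template : String) (type_of_item : List (String × String)) : Prop :=
  ∀ part ∈ (PySem.Chars.splitOn template.toList ['{']).drop 1,
    (PySem.Chars.splitOn part ['}']).length = 2 ∧
    String.ofList ((PySem.Chars.splitOn part ['}']).headD []) ∈ (["unknown", "variable", "hypothesis"] : List String)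
instance (template : String) (type_of_item : List (String × String)) : Decidable (Pre_generate_tactics_from_template template type_of_item) := by unfold Pre_generate_tactics_from_template; infer_instance

def pvWitness_generate_tactics_from_template : String × (List (String × String)) :=
  ("exact {variable} at {hypothesis}", [("x", "variable"), ("h", "hypothesis"), ("y", "variable")])

def Spec_generate_tactics_from_template (template : String) (type_of_item : List (String × String)) (out : List String) : Prop := out = generate_tactics_from_template_alt template type_of_item
instance (template : String) (type_of_item : List (String × String)) (out : List String) : Decidable (Spec_generate_tactics_from_template template type_of_item out) := by unfold Spec_generate_tactics_from_template; infer_instance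

-- ===== CLAIM (what is proved, stated in full; the proofs are below) =====
def Claim_equal_generate_tactics_from_template : Prop := ∀ (template : String) (type_of_item : List (String × String)), Dom_generate_tactics_from_template template type_of_item → Pre_generate_tactics_from_template template type_of_item → Spec_generate_tactics_from_template template type_of_item (generate_tactics_from_template template type_of_item)

-- ===== LEMMAS AND PROOFS =====

-- A's binning loop: for a key t among the three hard-coded ones, the final bin is the initial
-- bin followed by the first components of the pairs whose second component is t (B's filter).
theorem pv_bin_loop (pairs : List (String × String)) (d : PySem.Dict String (List (List Char)))
    (t : String) (hk : d.keys = ["unknown", "variable", "hypothesis"])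
    (ht : t ∈ (["unknown", "variable", "hypothesis"] : List String)) :
    (pairs.foldl
      (fun d p => if d.contains p.2 then d.modify p.2 [] (fun l => l ++ [p.1.toList]) else d)
      d).getD t []
    = d.getD t [] ++ (pairs.filter (fun p => p.2 == t)).map (fun p => p.1.toList) := by
  induction pairs generalizing d with
  | nil => simp
  | cons p pairs ih =>
    simp only [List.foldl_cons, List.filter_cons]
    rw [PySem.Dict.contains_eq_decide_mem_keys, hk]
    by_cases hp : p.2 ∈ (["unknown", "variable", "hypothesis"] : List String)
    · have hk' : (d.modify p.2 [] (fun l => l ++ [p.1.toList])).keys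
          = ["unknown", "variable", "hypothesis"] := by
        rw [PySem.Dict.keys_modify, PySem.Dict.keys_insert_of_contains, hk]
        rw [PySem.Dict.contains_eq_decide_mem_keys, hk]
        simp [hp]
      by_cases htp : p.2 = t
      · subst htp
        simp only [hp, decide_true, if_true, ih _ hk', PySem.Dict.getD_modify, beq_self_eq_true]
        simp
      · have hbe : (p.2 == t) = false := by simp [htp]
        simp only [hp, decide_true, if_true, ih _ hk', PySem.Dict.getD_modify, hbe]
        simp [Ne.symm htp]
    · have hbe : (p.2 == t) = false := by
        simp only [beq_eq_false_iff_ne, ne_eq]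
        rintro rfl; exact hp ht
      simp only [hp, decide_false, Bool.false_eq_true, if_false, hbe]
      exact ih d hk

-- materialising itertools.product and reconstructing equals the incremental fold
theorem pv_prod_fold (qs : List (List Char × List Char)) (bin : List Char → List (List Char))
    (ss : List (List Char)) :
    ss.flatMap (fun s => (pvProduct (qs.map (fun q => bin q.1))).map
      (fun c => (c.zip (qs.map (·.2))).foldl (fun s q => s ++ q.1 ++ q.2) s))
    = qs.foldl
        (fun ss q => ss.flatMap (fun s => ((bin q.1).map (fun it => s ++ it ++ q.2))))
        ss := by
  induction qs generalizing ss with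
  | nil => simp [pvProduct]
  | cons q qs ih =>
    simp only [List.map_cons, pvProduct, List.foldl_cons]
    rw [← ih]
    simp [List.flatMap_assoc, List.map_flatMap, List.flatMap_map, List.map_map, Function.comp_def]

-- the initial bins of A's dict are all empty
theorem pv_d0_empty : ∀ t ∈ (["unknown", "variable", "hypothesis"] : List String),
    (PySem.Dict.ofList [("unknown", ([] : List (List Char))), ("variable", []),
      ("hypothesis", [])]).getD t [] = [] := by decide

-- the whole body of A (product + reconstruction) equals the whole body of B (incremental
-- fold), given that A's bin and B's per-placeholder item list agree on the parsed types
theorem pv_main (qs : List (List Char × List Char)) (head : List Char)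
    (binA binB : List Char → List (List Char))
    (h : ∀ q ∈ qs, binA q.1 = binB q.1) :
    (pvProduct ((qs.map (·.1)).map binA)).map
      (fun c => String.ofList ((c.zip (qs.map (·.2))).foldl (fun s q => s ++ q.1 ++ q.2) head))
    = (qs.foldl (fun ss q => ss.flatMap (fun s => (binB q.1).map (fun it => s ++ it ++ q.2)))
        [head]).map String.ofList := by
  have hA : (qs.map (·.1)).map binA = qs.map (fun q => binB q.1) := by
    rw [List.map_map]
    exact List.map_congr_left (fun q hq => h q hq)
  rw [hA]
  have key : (pvProduct (qs.map (fun q => binB q.1))).map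
      (fun c => (c.zip (qs.map (·.2))).foldl (fun s q => s ++ q.1 ++ q.2) head)
      = qs.foldl (fun ss q => ss.flatMap (fun s => (binB q.1).map (fun it => s ++ it ++ q.2)))
          [head] := by
    have h1 := pv_prod_fold qs binB [head]
    simpa using h1
  rw [← key, List.map_map]
  rfl

-- ===== VERDICT (by name: the statement is the Claim_ definition above) =====
theorem generate_tactics_from_template_spec : Claim_equal_generate_tactics_from_template := by
  intro template toi _ hpre
  unfold Spec_generate_tactics_from_template
  unfold generate_tactics_from_template generate_tactics_from_template_alt
  refine pv_main (pvParse template).2 (pvParse template).1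
    (fun t => ((PySem.Dict.ofList toi).items.foldl
        (fun d p => if d.contains p.2 then d.modify p.2 [] (fun l => l ++ [p.1.toList]) else d)
        (PySem.Dict.ofList [("unknown", []), ("variable", []), ("hypothesis", [])])).getD
          (String.ofList t) [])
    (fun t => ((PySem.Dict.ofList toi).items.filter (fun p => p.2 == String.ofList t)).map
        (fun p => p.1.toList))
    ?_
  intro q hq
  obtain ⟨part, hpart, rfl⟩ := List.mem_map.mp hq
  have ht := (hpre part hpart).2
  simp only [pvSplitBrace]
  rw [pv_bin_loop _ _ _ (by decide) ht, pv_d0_empty _ ht, List.nil_append]
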